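-- pv_equiv track=rewrite | github.com/ankitshah009/leetcode_python | graphs/1498-number_of_subsequences_that_satisfy_given_sum_condition.py | numSubseq
-- ===== SOURCE A (Python) =====
-- from typing import List
--
-- def numSubseq(nums: List[int], target: int) -> int:
--     """
--     Detailed explanation:
--
--     After sorting, for a subsequence to have min=nums[i] and max=nums[j],
--     we need i <= j and nums[i] + nums[j] <= target.
--
--     For fixed i, find largest j where nums[i] + nums[j] <= target.
--     Then any subset of elements in [i+1, j] can be added to the subsequence.
--     Number of such subsets = 2^(j-i) (including empty set means nums[i] alone).
--     """
--     MOD = 10**9 + 7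
--     nums.sort()
--     n = len(nums)
--
--     # Precompute powers of 2
--     power = [1] * (n + 1)
--     for i in range(1, n + 1):
--         power[i] = (power[i - 1] * 2) % MOD
--
--     result = 0
--     j = n - 1
--
--     for i in range(n):
--         # Shrink j while sum exceeds target
--         while j >= i and nums[i] + nums[j] > target:
--             j -= 1
--
--         if j >= i:
--             # Can form subsequences with nums[i] as minimum
--             # Elements in range [i+1, j] can be freely included/excluded
--             # That's 2^(j-i) subsequences
--             result = (result + power[j - i]) % MOD
--
--     return result
-- ===== SOURCE B (Python) =====
-- def numSubseq(nums, target):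
--     # Same sort + power table, but each i gets an independent binary search
--     # (bisect_right, hand-written) for its largest valid partner index,
--     # instead of A's shared decreasing pointer. Note: A sorts nums in place;
--     # B leaves the argument untouched (return value is identical).
--     MOD = 10**9 + 7
--     s = sorted(nums)
--     n = len(s)
--     power = [1] * (n + 1)
--     for k in range(1, n + 1):
--         power[k] = (power[k - 1] * 2) % MOD
--     result = 0
--     for i in range(n):
--         key = target - s[i]
--         lo, hi = 0, n
--         while lo < hi:
--             mid = (lo + hi) // 2
--             if key < s[mid]:
--                 hi = mid
--             else:
--                 lo = mid + 1
--         j = lo - 1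
--         if j >= i:
--             result = (result + power[j - i]) % MOD
--     return result
-- ===== Notes on version B (the rewrite author's own statement) =====
-- stated objective: alternative
-- what changed: Replaces A's shared amortized decreasing pointer with an independent hand-written binary search (bisect_right) per index i to find the largest valid partner; sort and power-of-2 table are kept, and B does not mutate the input list (A sorts it in place).
import Mathlib
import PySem

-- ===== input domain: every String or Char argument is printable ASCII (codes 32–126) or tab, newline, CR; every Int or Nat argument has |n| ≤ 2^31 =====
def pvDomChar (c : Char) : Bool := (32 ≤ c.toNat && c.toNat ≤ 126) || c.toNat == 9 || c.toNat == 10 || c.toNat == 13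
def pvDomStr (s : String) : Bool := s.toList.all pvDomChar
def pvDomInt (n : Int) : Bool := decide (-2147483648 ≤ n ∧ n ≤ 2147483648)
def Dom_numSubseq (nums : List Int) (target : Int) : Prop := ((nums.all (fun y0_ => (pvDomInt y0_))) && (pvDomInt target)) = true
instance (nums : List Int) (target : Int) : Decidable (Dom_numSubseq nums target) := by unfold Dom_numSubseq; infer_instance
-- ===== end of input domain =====

-- B replaces A's shared decreasing pointer by an independent per-i binary search
-- (alternative algorithm, same sort + power table). A sorts its argument in place;
-- B does not mutate it — the equivalence proved here is about the return value.

-- ===== PORT A =====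

-- power table: [1]*(n+1) then power[i] = power[i-1]*2 % MOD  (identical code in A and B)
def buildPower (n : Nat) : List Int :=
  (PySem.List.pyRange 1 ((n : Int) + 1) 1).foldl
    (fun power i =>
      PySem.List.pySetD power i
        (PySem.Int.mod (PySem.List.pyGetD power (i - 1) 0 * 2) 1000000007))
    (List.replicate (n + 1) 1)

-- the inner `while j >= i and nums[i] + nums[j] > target: j -= 1` loop of A
def shrinkA (s : List Int) (target : Int) (i : Nat) (j : Int) : Int :=
  if h : (i : Int) ≤ j ∧ PySem.List.pyGetD s (i : Int) 0 + PySem.List.pyGetD s j 0 > target then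
    shrinkA s target i (j - 1)
  else j
termination_by (j + 1 - (i : Int)).toNat
decreasing_by omega

-- one iteration of A's `for i in range(n)` loop, state = (result, j)
def stepA (s : List Int) (target : Int) (power : List Int) (st : Int × Int) (i : Nat) :
    Int × Int :=
  let j := shrinkA s target i st.2
  if (i : Int) ≤ j then
    (PySem.Int.mod (st.1 + PySem.List.pyGetD power (j - (i : Int)) 0) 1000000007, j)
  else (st.1, j)

def numSubseq (nums : List Int) (target : Int) : Int :=
  let s := PySem.List.sorted nums (fun x => x) false
  let n := s.length
  let power := buildPower n
  ((List.range n).foldl (stepA s target power) (0, (n : Int) - 1)).1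

-- ===== PORT B =====

-- hand-written bisect_right of Source B: while lo < hi: mid = (lo+hi)//2; …
def bisectR (s : List Int) (key : Int) (lo hi : Nat) : Nat :=
  if h : lo < hi then
    let mid := (lo + hi) / 2
    if key < PySem.List.pyGetD s (mid : Int) 0 then bisectR s key lo mid
    else bisectR s key (mid + 1) hi
  else lo
termination_by hi - lo
decreasing_by all_goals omega

-- one iteration of B's `for i in range(n)` loop, state = result
def stepB (s : List Int) (target : Int) (power : List Int) (result : Int) (i : Nat) : Int :=
  let key := target - PySem.List.pyGetD s (i : Int) 0
  let j : Int := (bisectR s key 0 s.length : Int) - 1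
  if (i : Int) ≤ j then
    PySem.Int.mod (result + PySem.List.pyGetD power (j - (i : Int)) 0) 1000000007
  else result

def numSubseq_alt (nums : List Int) (target : Int) : Int :=
  let s := PySem.List.sorted nums (fun x => x) false
  let n := s.length
  let power := buildPower n
  (List.range n).foldl (stepB s target power) 0

-- ===== PRECONDITION & SPEC =====
def Spec_numSubseq (nums : List Int) (target : Int) (out : Int) : Prop := out = numSubseq_alt nums target
instance (nums : List Int) (target : Int) (out : Int) : Decidable (Spec_numSubseq nums target out) := by unfold Spec_numSubseq; infer_instance

-- ===== CLAIM (what is proved, stated in full; the proofs are below) =====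
def Claim_equal_numSubseq : Prop := ∀ (nums : List Int) (target : Int), Dom_numSubseq nums target → Spec_numSubseq nums target (numSubseq nums target)

-- ===== LEMMAS AND PROOFS =====

-- largest index with value ≤ target - s[i], as computed by B (as an Int, -1 if none)
def Jf (s : List Int) (target : Int) (i : Nat) : Int :=
  (bisectR s (target - s.getD i 0) 0 s.length : Int) - 1

theorem mono_getD (s : List Int) (hs : s.Pairwise (· ≤ ·)) (a b : Nat) (hab : a ≤ b)
    (hb : b < s.length) : s.getD a 0 ≤ s.getD b 0 := by
  have ha : a < s.length := lt_of_le_of_lt hab hb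
  rw [List.getD_eq_getElem s 0 ha, List.getD_eq_getElem s 0 hb]
  rcases eq_or_lt_of_le hab with h | h
  · subst h; exact le_refl _
  · exact List.pairwise_iff_getElem.mp hs a b ha hb h

theorem bisectR_spec' (s : List Int) (key : Int)
    (hmono : ∀ a b : Nat, a ≤ b → b < s.length → s.getD a 0 ≤ s.getD b 0) :
    ∀ (d lo hi : Nat), hi - lo ≤ d → lo ≤ hi → hi ≤ s.length →
      (∀ t : Nat, t < s.length → t < lo → s.getD t 0 ≤ key) →
      (∀ t : Nat, t < s.length → hi ≤ t → key < s.getD t 0) →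
      lo ≤ bisectR s key lo hi ∧ bisectR s key lo hi ≤ hi ∧
      (∀ t : Nat, t < s.length → t < bisectR s key lo hi → s.getD t 0 ≤ key) ∧
      (∀ t : Nat, t < s.length → bisectR s key lo hi ≤ t → key < s.getD t 0) := by
  intro d
  induction d with
  | zero =>
    intro lo hi hfuel hlohi hhi hlow hhigh
    have heq : lo = hi := by omega
    rw [bisectR]
    have : ¬ lo < hi := by omega
    simp only [this, dite_false]
    exact ⟨le_refl _, by omega, fun t ht h => hlow t ht h, fun t ht h => hhigh t ht (by omega)⟩
  | succ d ih =>
    intro lo hi hfuel hlohi hhi hlow hhigh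
    rw [bisectR]
    by_cases hlt : lo < hi
    · simp only [hlt, dite_true]
      have hmidlo : lo ≤ (lo + hi) / 2 := by omega
      have hmidhi : (lo + hi) / 2 < hi := by omega
      have hmidlen : (lo + hi) / 2 < s.length := by omega
      have hget : PySem.List.pyGetD s (((lo + hi) / 2 : Nat) : Int) 0 = s.getD ((lo + hi) / 2) 0 := by
        rw [PySem.List.pyGetD_natCast]
      by_cases hcmp : key < PySem.List.pyGetD s (((lo + hi) / 2 : Nat) : Int) 0
      · simp only [hcmp, if_true]
        have hkeymid : key < s.getD ((lo + hi) / 2) 0 := by rw [← hget]; exact hcmp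
        have := ih lo ((lo + hi) / 2) (by omega) (by omega) (by omega) hlow
          (fun t ht h => lt_of_lt_of_le hkeymid (hmono _ t h ht))
        exact ⟨this.1, le_trans this.2.1 (by omega), this.2.2.1, this.2.2.2⟩
      · simp only [hcmp, if_false]
        have hmidkey : s.getD ((lo + hi) / 2) 0 ≤ key := by rw [← hget]; omega
        have := ih ((lo + hi) / 2 + 1) hi (by omega) (by omega) hhi
          (fun t ht h => le_trans (hmono t _ (by omega) hmidlen) hmidkey) hhigh
        exact ⟨le_trans (by omega) this.1, this.2.1, this.2.2.1, this.2.2.2⟩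
    · simp only [hlt, dite_false]
      exact ⟨le_refl _, by omega, fun t ht h => hlow t ht h, fun t ht h => hhigh t ht (by omega)⟩

theorem bisectR_le (s : List Int) (key : Int)
    (hmono : ∀ a b : Nat, a ≤ b → b < s.length → s.getD a 0 ≤ s.getD b 0) :
    bisectR s key 0 s.length ≤ s.length :=
  (bisectR_spec' s key hmono s.length 0 s.length (by omega) (by omega) le_rfl
    (by omega) (by omega)).2.1

theorem bisectR_low (s : List Int) (key : Int)
    (hmono : ∀ a b : Nat, a ≤ b → b < s.length → s.getD a 0 ≤ s.getD b 0)
    (t : Nat) (ht : t < s.length) (h : t < bisectR s key 0 s.length) :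
    s.getD t 0 ≤ key :=
  (bisectR_spec' s key hmono s.length 0 s.length (by omega) (by omega) le_rfl
    (by omega) (by omega)).2.2.1 t ht h

theorem bisectR_high (s : List Int) (key : Int)
    (hmono : ∀ a b : Nat, a ≤ b → b < s.length → s.getD a 0 ≤ s.getD b 0)
    (t : Nat) (ht : t < s.length) (h : bisectR s key 0 s.length ≤ t) :
    key < s.getD t 0 :=
  (bisectR_spec' s key hmono s.length 0 s.length (by omega) (by omega) le_rfl
    (by omega) (by omega)).2.2.2 t ht h

theorem bisectR_mono (s : List Int) (key key' : Int) (hk : key ≤ key')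
    (hmono : ∀ a b : Nat, a ≤ b → b < s.length → s.getD a 0 ≤ s.getD b 0) :
    bisectR s key 0 s.length ≤ bisectR s key' 0 s.length := by
  by_contra hcon
  push_neg at hcon
  have hb : bisectR s key 0 s.length ≤ s.length := bisectR_le s key hmono
  have ht : bisectR s key' 0 s.length < s.length := by omega
  have h1 : s.getD (bisectR s key' 0 s.length) 0 ≤ key :=
    bisectR_low s key hmono _ ht hcon
  have h2 : key' < s.getD (bisectR s key' 0 s.length) 0 :=
    bisectR_high s key' hmono _ ht le_rfl
  omega

theorem Jf_le (s : List Int) (target : Int) (i : Nat)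
    (hmono : ∀ a b : Nat, a ≤ b → b < s.length → s.getD a 0 ≤ s.getD b 0) :
    Jf s target i ≤ (s.length : Int) - 1 := by
  have := bisectR_le s (target - s.getD i 0) hmono
  unfold Jf
  omega

theorem Jf_anti (s : List Int) (target : Int) (i i' : Nat) (h : i ≤ i') (hi' : i' < s.length)
    (hmono : ∀ a b : Nat, a ≤ b → b < s.length → s.getD a 0 ≤ s.getD b 0) :
    Jf s target i' ≤ Jf s target i := by
  have hkey : target - s.getD i' 0 ≤ target - s.getD i 0 := by
    have := hmono i i' h hi'
    omega
  have := bisectR_mono s (target - s.getD i' 0) (target - s.getD i 0) hkey hmono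
  unfold Jf
  omega

theorem shrink_eq (s : List Int) (target : Int)
    (hmono : ∀ a b : Nat, a ≤ b → b < s.length → s.getD a 0 ≤ s.getD b 0)
    (k : Nat) (hk : k < s.length) :
    ∀ (d : Nat) (j : Int), (j + 1 - (k : Int)).toNat ≤ d →
      Jf s target k ≤ j → j ≤ (s.length : Int) - 1 →
      shrinkA s target k j = if (k : Int) ≤ j then max (Jf s target k) ((k : Int) - 1) else j := by
  intro d
  induction d with
  | zero =>
    intro j hfuel hJ hjlen
    have hkj : ¬ ((k : Int) ≤ j) := by omega
    rw [shrinkA]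
    simp [hkj]
  | succ d ih =>
    intro j hfuel hJ hjlen
    rw [shrinkA]
    by_cases hc : (k : Int) ≤ j ∧ PySem.List.pyGetD s (k : Int) 0 + PySem.List.pyGetD s j 0 > target
    · rw [dif_pos hc]
      obtain ⟨hkj, hsum⟩ := hc
      have hj0 : (0 : Int) ≤ j := by omega
      have hjlt : j < (s.length : Int) := by omega
      have hgk : PySem.List.pyGetD s (k : Int) 0 = s.getD k 0 := by
        rw [PySem.List.pyGetD_natCast]
      have hj' : j = (j.toNat : Int) := (Int.toNat_of_nonneg hj0).symm
      have hgj : PySem.List.pyGetD s j 0 = s.getD j.toNat 0 := by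
        conv_lhs => rw [hj', PySem.List.pyGetD_natCast]
      have hjkey : target - s.getD k 0 < s.getD j.toNat 0 := by
        rw [hgk, hgj] at hsum; omega
      have hBr : bisectR s (target - s.getD k 0) 0 s.length ≤ j.toNat := by
        by_contra hcon
        push_neg at hcon
        have := bisectR_low s (target - s.getD k 0) hmono j.toNat (by omega) hcon
        omega
      have hJ' : Jf s target k ≤ j - 1 := by
        unfold Jf; omega
      have := ih (j - 1) (by omega) hJ' (by omega)
      rw [this]
      by_cases h2 : (k : Int) ≤ j - 1
      · simp only [h2, if_true, if_pos hkj]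
      · -- j = k
        have hjk : j = (k : Int) := by omega
        have : Jf s target k ≤ (k : Int) - 1 := by omega
        simp only [h2, if_false, if_pos hkj]
        omega
    · rw [dif_neg hc]
      push_neg at hc
      by_cases hkj : (k : Int) ≤ j
      · have hsum := hc hkj
        have hj0 : (0 : Int) ≤ j := by omega
        have hjlt : j < (s.length : Int) := by omega
        have hgk : PySem.List.pyGetD s (k : Int) 0 = s.getD k 0 := by
          rw [PySem.List.pyGetD_natCast]
        have hj' : j = (j.toNat : Int) := (Int.toNat_of_nonneg hj0).symm
        have hgj : PySem.List.pyGetD s j 0 = s.getD j.toNat 0 := by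
          conv_lhs => rw [hj', PySem.List.pyGetD_natCast]
        have hjkey : s.getD j.toNat 0 ≤ target - s.getD k 0 := by
          rw [hgk, hgj] at hsum; omega
        have hBr : j.toNat < bisectR s (target - s.getD k 0) 0 s.length := by
          by_contra hcon
          push_neg at hcon
          have := bisectR_high s (target - s.getD k 0) hmono j.toNat (by omega) hcon
          omega
        have hjJ : j ≤ Jf s target k := by unfold Jf; omega
        have : j = Jf s target k := le_antisymm hjJ hJ
        rw [if_pos hkj]
        omega
      · rw [if_neg hkj]

theorem fold_inv (s : List Int) (target : Int) (power : List Int)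
    (hmono : ∀ a b : Nat, a ≤ b → b < s.length → s.getD a 0 ≤ s.getD b 0) :
    ∀ k : Nat, k ≤ s.length →
      ((List.range k).foldl (stepA s target power) (0, (s.length : Int) - 1)).1 =
        (List.range k).foldl (stepB s target power) 0 ∧
      ((List.range k).foldl (stepA s target power) (0, (s.length : Int) - 1)).2 ≤ (s.length : Int) - 1 ∧
      (∀ i : Nat, k ≤ i → i < s.length →
        Jf s target i ≤ ((List.range k).foldl (stepA s target power) (0, (s.length : Int) - 1)).2) := by
  intro k
  induction k with
  | zero =>
    intro _
    refine ⟨rfl, le_refl _, fun i _ hi => ?_⟩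
    exact Jf_le s target i hmono
  | succ k ih =>
    intro hk1
    have hk : k < s.length := by omega
    obtain ⟨hres, hlen, hJ⟩ := ih (by omega)
    set a := (List.range k).foldl (stepA s target power) (0, (s.length : Int) - 1) with ha
    set b := (List.range k).foldl (stepB s target power) 0 with hb
    simp only [List.range_succ, List.foldl_append, List.foldl_cons, List.foldl_nil, ← ha, ← hb]
    have hJk : Jf s target k ≤ a.2 := hJ k le_rfl hk
    have hshr : shrinkA s target k a.2 =
        if (k : Int) ≤ a.2 then max (Jf s target k) ((k : Int) - 1) else a.2 :=
      shrink_eq s target hmono k hk (a.2 + 1 - (k : Int)).toNat a.2 le_rfl hJk hlen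
    have hkeyB : target - PySem.List.pyGetD s (k : Int) 0 = target - s.getD k 0 := by
      rw [PySem.List.pyGetD_natCast]
    simp only [stepA, stepB, hshr, hkeyB]
    have hjb : (bisectR s (target - s.getD k 0) 0 s.length : Int) - 1 = Jf s target k := rfl
    rw [hjb]
    by_cases hka : (k : Int) ≤ a.2
    · simp only [hka, if_true]
      by_cases hadd : (k : Int) ≤ Jf s target k
      · have hmax : max (Jf s target k) ((k : Int) - 1) = Jf s target k := by omega
        simp only [hmax, if_pos hadd]
        refine ⟨by rw [hres], by have := Jf_le s target k hmono; omega, fun i hi hilen => ?_⟩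
        have := Jf_anti s target k i (by omega) hilen hmono
        omega
      · have hnadd : ¬ ((k : Int) ≤ max (Jf s target k) ((k : Int) - 1)) := by omega
        simp only [if_neg hnadd, if_neg hadd]
        refine ⟨hres, by omega, fun i hi hilen => ?_⟩
        have := Jf_anti s target k i (by omega) hilen hmono
        omega
    · simp only [hka, if_false]
      have hnaddB : ¬ ((k : Int) ≤ Jf s target k) := by omega
      rw [if_neg hnaddB]
      refine ⟨hres, hlen, fun i hi hilen => ?_⟩
      have := Jf_anti s target k i (by omega) hilen hmono
      omega

-- ===== VERDICT (by name: the statement is the Claim_ definition above) =====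
theorem numSubseq_spec : Claim_equal_numSubseq := by
  intro nums target _
  unfold Spec_numSubseq numSubseq numSubseq_alt
  have hs := PySem.List.sorted_pairwise nums (fun x => x)
  exact (fold_inv _ target _ (mono_getD _ hs) _ le_rfl).1
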